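-- pv_equiv track=rewrite | github.com/xiaoliangshun/LeetCode | 228. 汇总区间.py | summaryRanges2
-- ===== SOURCE A (Python) =====
-- def summaryRanges2(nums):         #定于low和hight，hight向后移动直到找到以low不相等的元素，若low==hight-1则只有一个元素
--     list1 = list()
--     i = 0
--     n = len(nums)
--     while i < n :
--         low = i
--         i += 1
--         while i < n and nums[i] == nums[i - 1] + 1:         #找到了下一个不相同的元素
--             i += 1
--         high = i - 1            #回到最后一个相同的元素
--         temp = str(nums[low])
--         if low < high:
--             temp += "->"
--             temp += str(nums[high])
--         list1.append(temp)
--     return list1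
-- ===== SOURCE B (Python) =====
-- def summaryRanges2(nums):
--     n = len(nums)
--     if n == 0:
--         return []
--     bounds = [0] + [i for i in range(1, n) if nums[i] != nums[i - 1] + 1] + [n]
--     return [str(nums[s]) if e - 1 == s else str(nums[s]) + "->" + str(nums[e - 1])
--             for s, e in zip(bounds, bounds[1:])]
-- ===== Notes on version B (the rewrite author's own statement) =====
-- stated objective: alternative
-- what changed: Replaces A's nested while-loop advance-and-emit scan with a two-phase decomposition: one pass collecting run-boundary indices, then a zip over consecutive boundary pairs emitting each segment string.
import Mathlib
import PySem

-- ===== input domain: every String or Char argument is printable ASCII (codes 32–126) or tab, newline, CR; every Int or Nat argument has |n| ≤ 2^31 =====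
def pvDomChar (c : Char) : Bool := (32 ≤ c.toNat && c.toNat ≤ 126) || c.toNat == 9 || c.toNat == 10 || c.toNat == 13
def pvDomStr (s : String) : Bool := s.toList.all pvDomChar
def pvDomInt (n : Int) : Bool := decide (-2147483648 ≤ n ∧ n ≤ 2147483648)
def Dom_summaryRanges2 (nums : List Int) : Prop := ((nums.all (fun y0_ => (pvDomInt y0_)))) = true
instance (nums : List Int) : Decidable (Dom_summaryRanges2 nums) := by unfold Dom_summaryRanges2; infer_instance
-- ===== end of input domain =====

-- B replaces A's nested while-loop scan with a boundary-index pass followed by a pair-wise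
-- segment-emission pass (alternative decomposition, same O(n) cost).
-- Indices are always nonnegative and in range when accessed, so List.getD is exact for nums[i].

-- ===== PORT A =====
-- inner while: advance i while i < n and nums[i] == nums[i-1] + 1
def aInner (nums : List Int) (i : Nat) : Nat :=
  if i < nums.length ∧ nums.getD i 0 = nums.getD (i - 1) 0 + 1 then
    aInner nums (i + 1)
  else i
termination_by nums.length - i
decreasing_by omega

theorem aInner_ge (nums : List Int) (i : Nat) : i ≤ aInner nums i := by
  unfold aInner
  split
  · have := aInner_ge nums (i + 1); omega
  · exact le_refl i
termination_by nums.length - i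
decreasing_by omega

-- outer while over i, appending one segment string per iteration
def aOuter (nums : List Int) (list1 : List String) (i : Nat) : List String :=
  if _h : i < nums.length then
    let low := i
    let i2 := aInner nums (i + 1)
    let high := i2 - 1
    let temp := PySem.Int.toStr (nums.getD low 0)
    let temp := if low < high then temp ++ "->" ++ PySem.Int.toStr (nums.getD high 0) else temp
    aOuter nums (list1 ++ [temp]) i2
  else list1
termination_by nums.length - i
decreasing_by
  have := aInner_ge nums (i + 1); omega

def summaryRanges2 (nums : List Int) : List String :=
  aOuter nums [] 0

-- ===== PORT B =====
-- str(nums[s]) if e-1 == s else str(nums[s]) + "->" + str(nums[e-1])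
def bEmit (nums : List Int) (s e : Nat) : String :=
  if e - 1 = s then PySem.Int.toStr (nums.getD s 0)
  else PySem.Int.toStr (nums.getD s 0) ++ "->" ++ PySem.Int.toStr (nums.getD (e - 1) 0)

def summaryRanges2_alt (nums : List Int) : List String :=
  let n := nums.length
  if n = 0 then []
  else
    let bounds : List Nat :=
      [0] ++ (List.range' 1 (n - 1)).filter (fun i => nums.getD i 0 != nums.getD (i - 1) 0 + 1) ++ [n]
    (bounds.zip bounds.tail).map (fun p => bEmit nums p.1 p.2)

-- ===== PRECONDITION & SPEC =====
def Spec_summaryRanges2 (nums : List Int) (out : List String) : Prop := out = summaryRanges2_alt nums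
instance (nums : List Int) (out : List String) : Decidable (Spec_summaryRanges2 nums out) := by unfold Spec_summaryRanges2; infer_instance

-- ===== CLAIM (what is proved, stated in full; the proofs are below) =====
def Claim_equal_summaryRanges2 : Prop := ∀ (nums : List Int), Dom_summaryRanges2 nums → Spec_summaryRanges2 nums (summaryRanges2 nums)

-- ===== LEMMAS AND PROOFS =====

-- boundary indices from m up (B's filtered range, parameterised by its start)
def bnds (nums : List Int) (m : Nat) : List Nat :=
  (List.range' m (nums.length - m)).filter (fun i => nums.getD i 0 != nums.getD (i - 1) 0 + 1)

-- pair-wise emission over a boundary list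
def emitList (nums : List Int) : List Nat → List String
  | s :: e :: rest => bEmit nums s e :: emitList nums (e :: rest)
  | _ => []

theorem aInner_le (nums : List Int) (i : Nat) (h : i ≤ nums.length) :
    aInner nums i ≤ nums.length := by
  unfold aInner
  split
  · next hc => exact aInner_le nums (i + 1) (by omega)
  · exact h
termination_by nums.length - i
decreasing_by omega

theorem bnds_split (nums : List Int) (m : Nat) :
    bnds nums m =
      if aInner nums m < nums.length then aInner nums m :: bnds nums (aInner nums m + 1)
      else [] := by
  by_cases hm : m < nums.length
  · have hr : List.range' m (nums.length - m)
        = m :: List.range' (m + 1) (nums.length - (m + 1)) := by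
      have : nums.length - m = (nums.length - (m + 1)) + 1 := by omega
      rw [this, List.range'_succ]
    by_cases hc : nums.getD m 0 = nums.getD (m - 1) 0 + 1
    · have hf : (nums.getD m 0 != nums.getD (m - 1) 0 + 1) = false := bne_eq_false_iff_eq.mpr hc
      have h1 : bnds nums m = bnds nums (m + 1) := by
        unfold bnds
        rw [hr, List.filter_cons, hf, if_neg Bool.false_ne_true]
      have h2 : aInner nums m = aInner nums (m + 1) := by
        rw [aInner, if_pos ⟨hm, hc⟩]
      rw [h1, h2, bnds_split nums (m + 1)]
    · have hf : (nums.getD m 0 != nums.getD (m - 1) 0 + 1) = true := bne_iff_ne.mpr hc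
      have h2 : aInner nums m = m := by
        rw [aInner, if_neg (by tauto)]
      have h1 : bnds nums m = m :: bnds nums (m + 1) := by
        unfold bnds
        rw [hr, List.filter_cons, hf, if_pos rfl]
      rw [h1, h2, if_pos hm]
  · have h2 : aInner nums m = m := by
      rw [aInner, if_neg (by tauto)]
    have h1 : bnds nums m = [] := by
      unfold bnds
      have : nums.length - m = 0 := by omega
      rw [this]
      rfl
    rw [h1, h2, if_neg hm]
termination_by nums.length - m
decreasing_by all_goals omega

theorem zip_map_emitList (nums : List Int) (l : List Nat) :
    ((l.zip l.tail).map (fun p => bEmit nums p.1 p.2)) = emitList nums l := by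
  match l with
  | [] => rfl
  | [s] => rfl
  | s :: e :: rest =>
    have ih := zip_map_emitList nums (e :: rest)
    simp only [List.tail_cons] at ih
    simp only [List.tail_cons, List.zip_cons_cons, List.map_cons, emitList, ih]

theorem temp_eq_bEmit (nums : List Int) (i j : Nat) (hij : i + 1 ≤ j) :
    (if i < j - 1 then
        PySem.Int.toStr (nums.getD i 0) ++ "->" ++ PySem.Int.toStr (nums.getD (j - 1) 0)
      else PySem.Int.toStr (nums.getD i 0)) = bEmit nums i j := by
  unfold bEmit
  by_cases h : j - 1 = i
  · simp [h]
  · have : i < j - 1 := by omega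
    simp [h, this]

theorem aOuter_eq (nums : List Int) (i : Nat) (acc : List String) (hi : i < nums.length) :
    aOuter nums acc i = acc ++ emitList nums (i :: (bnds nums (i + 1) ++ [nums.length])) := by
  have hj := aInner_ge nums (i + 1)
  have hjle := aInner_le nums (i + 1) (by omega)
  rw [aOuter]
  simp only [hi, dif_pos]
  rw [temp_eq_bEmit nums i (aInner nums (i + 1)) hj]
  rw [bnds_split nums (i + 1)]
  by_cases hlt : aInner nums (i + 1) < nums.length
  · rw [if_pos hlt]
    rw [aOuter_eq nums (aInner nums (i + 1)) (acc ++ [bEmit nums i (aInner nums (i + 1))]) hlt]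
    simp [emitList]
  · rw [if_neg hlt]
    have hjn : aInner nums (i + 1) = nums.length := by omega
    rw [aOuter]
    simp only [hjn, lt_irrefl, dif_neg, not_false_iff]
    simp [emitList]
termination_by nums.length - i
decreasing_by omega

-- ===== VERDICT (by name: the statement is the Claim_ definition above) =====
theorem summaryRanges2_spec : Claim_equal_summaryRanges2 := by
  intro nums _
  unfold Spec_summaryRanges2 summaryRanges2 summaryRanges2_alt
  by_cases hn : nums.length = 0
  · rw [aOuter]
    simp [hn]
  · have h0 : 0 < nums.length := Nat.pos_of_ne_zero hn
    simp only [hn, ite_false]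
    rw [zip_map_emitList, aOuter_eq nums 0 [] h0]
    simp [bnds]
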